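-- pv_equiv track=rewrite | github.com/med13foundation/artana-evidence-platform | services/artana_evidence_api/runtime/postgres_store.py | _normalize_postgres_dsn
-- ===== SOURCE A (Python) =====
-- def _normalize_postgres_dsn(database_url: str) -> str:
--     replacements = (
--         ("postgresql+psycopg2://", "postgresql://"),
--         ("postgresql+psycopg://", "postgresql://"),
--         ("postgresql+asyncpg://", "postgresql://"),
--     )
--     for prefix, replacement in replacements:
--         if database_url.startswith(prefix):
--             return database_url.replace(prefix, replacement, 1)
--     return database_url
-- ===== SOURCE B (Python) =====
-- _QUALIFIED_SCHEMES = frozenset({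
--     "postgresql+psycopg2",
--     "postgresql+psycopg",
--     "postgresql+asyncpg",
-- })
--
--
-- def _normalize_postgres_dsn(database_url: str) -> str:
--     scheme, sep, rest = database_url.partition("://")
--     if sep and scheme in _QUALIFIED_SCHEMES:
--         return "postgresql://" + rest
--     return database_url
-- ===== Notes on version B (the rewrite author's own statement) =====
-- stated objective: idiomatic
-- what changed: Instead of scanning a tuple of full prefixes and calling str.replace, B partitions the URL once at the scheme separator and does a single set-membership test on the scheme, rebuilding the URL from the remainder.
import Mathlib
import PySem

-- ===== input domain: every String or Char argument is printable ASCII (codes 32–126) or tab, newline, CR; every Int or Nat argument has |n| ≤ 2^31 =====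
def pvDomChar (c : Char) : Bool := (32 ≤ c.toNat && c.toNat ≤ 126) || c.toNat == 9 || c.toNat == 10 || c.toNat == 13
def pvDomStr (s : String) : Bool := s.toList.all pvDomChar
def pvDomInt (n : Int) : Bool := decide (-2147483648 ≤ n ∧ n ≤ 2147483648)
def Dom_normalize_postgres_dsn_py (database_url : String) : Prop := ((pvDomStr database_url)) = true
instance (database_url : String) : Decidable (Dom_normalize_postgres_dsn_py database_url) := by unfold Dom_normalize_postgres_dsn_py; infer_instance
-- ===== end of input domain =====

-- B replaces A's prefix-tuple scan + str.replace by one partition on '://' and a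
-- set-membership test on the scheme (objective: idiomatic; same cost).

-- ===== PORT A =====
-- hand port of s.replace(old, new, 1): replace the FIRST occurrence of old
-- (exact for count = 1, including old = '' which inserts new at the front)
def pvReplace1 (old new : List Char) : List Char → List Char
  | [] => if old.isPrefixOf [] then new else []
  | c :: t =>
      if old.isPrefixOf (c :: t) then new ++ (c :: t).drop old.length
      else c :: pvReplace1 old new t

-- the for-loop over the replacements tuple
def pvLoopA : List (String × String) → String → String
  | [], url => url
  | (pre, rep) :: rest, url =>
      if PySem.Str.startswith url pre then
        String.ofList (pvReplace1 pre.toList rep.toList url.toList)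
      else pvLoopA rest url

def normalize_postgres_dsn_py (database_url : String) : String :=
  pvLoopA
    [("postgresql+psycopg2://", "postgresql://"),
     ("postgresql+psycopg://", "postgresql://"),
     ("postgresql+asyncpg://", "postgresql://")]
    database_url

-- ===== PORT B =====
-- hand port of str.partition(sep) for nonempty sep: split at the FIRST occurrence
-- of sep; none = sep absent (Python's ('', '', s)-with-empty-sep case is a ValueError,
-- not reached here since sep = '://')
def pvPartition? (sep : List Char) : List Char → Option (List Char × List Char)
  | [] => none
  | c :: t =>
      if sep.isPrefixOf (c :: t) then some ([], (c :: t).drop sep.length)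
      else (pvPartition? sep t).map (fun p => (c :: p.1, p.2))

def normalize_postgres_dsn_py_alt (database_url : String) : String :=
  match pvPartition? "://".toList database_url.toList with
  | some (scheme, rest) =>
      -- the frozenset membership test, on the scheme as a list of chars
      if ["postgresql+psycopg2".toList, "postgresql+psycopg".toList,
          "postgresql+asyncpg".toList].contains scheme then
        String.ofList ("postgresql://".toList ++ rest)
      else database_url
  | none => database_url

-- ===== PRECONDITION & SPEC =====
def Spec_normalize_postgres_dsn_py (database_url : String) (out : String) : Prop := out = normalize_postgres_dsn_py_alt database_url
instance (database_url : String) (out : String) : Decidable (Spec_normalize_postgres_dsn_py database_url out) := by unfold Spec_normalize_postgres_dsn_py; infer_instance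

-- ===== CLAIM (what is proved, stated in full; the proofs are below) =====
def Claim_equal_normalize_postgres_dsn_py : Prop := ∀ (database_url : String), Dom_normalize_postgres_dsn_py database_url → Spec_normalize_postgres_dsn_py database_url (normalize_postgres_dsn_py database_url)

-- ===== LEMMAS AND PROOFS =====

theorem pvPartition?_eq_some {sep l a b : List Char}
    (h : pvPartition? sep l = some (a, b)) : l = a ++ sep ++ b := by
  induction l generalizing a b with
  | nil => simp [pvPartition?] at h
  | cons c t ih =>
    rw [pvPartition?] at h
    split_ifs at h with hp
    · rw [List.isPrefixOf_iff_prefix] at hp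
      obtain ⟨u, hu⟩ := hp
      obtain ⟨rfl, rfl⟩ := by simpa using h
      simp [← hu]
    · cases hrec : pvPartition? sep t with
      | none => simp [hrec] at h
      | some p =>
        obtain ⟨p1, p2⟩ := p
        simp only [hrec, Option.map_some] at h
        obtain ⟨rfl, rfl⟩ := by simpa using h
        simpa using ih hrec

theorem part_s1 (t : List Char) :
    pvPartition? "://".toList ("postgresql+psycopg2".toList ++ "://".toList ++ t)
      = some ("postgresql+psycopg2".toList, t) := by
  simp [pvPartition?, List.isPrefixOf]

theorem part_s2 (t : List Char) :
    pvPartition? "://".toList ("postgresql+psycopg".toList ++ "://".toList ++ t)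
      = some ("postgresql+psycopg".toList, t) := by
  simp [pvPartition?, List.isPrefixOf]

theorem part_s3 (t : List Char) :
    pvPartition? "://".toList ("postgresql+asyncpg".toList ++ "://".toList ++ t)
      = some ("postgresql+asyncpg".toList, t) := by
  simp [pvPartition?, List.isPrefixOf]

-- replacing a prefix (as first occurrence, count 1)
theorem pvReplace1_prefix (old new b : List Char) :
    pvReplace1 old new (old ++ b) = new ++ b := by
  cases hol : old ++ b with
  | nil =>
    have : old = [] ∧ b = [] := by simpa using hol
    simp [this.1, this.2, pvReplace1]
  | cons c t =>
    have hp : old.isPrefixOf (c :: t) := by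
      rw [List.isPrefixOf_iff_prefix, ← hol]; exact List.prefix_append old b
    rw [pvReplace1, if_pos hp, ← hol]
    simp

theorem normalize_postgres_dsn_py_spec : Claim_equal_normalize_postgres_dsn_py := by
  intro url _
  unfold Spec_normalize_postgres_dsn_py
  have sw : ∀ (q : String), PySem.Str.startswith url q = true ↔
      ∃ t, url.toList = q.toList ++ t := by
    intro q
    rw [PySem.Str.startswith_eq, PySem.Chars.startswith_iff]
    exact ⟨fun ⟨t, h⟩ => ⟨t, h.symm⟩, fun ⟨t, h⟩ => ⟨t, h.symm⟩⟩
  have key : ∀ (q p : String) (t : List Char),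
      q.toList = p.toList ++ "://".toList →
      (∀ u, pvPartition? "://".toList (p.toList ++ "://".toList ++ u)
          = some (p.toList, u)) →
      url.toList = q.toList ++ t →
      pvPartition? "://".toList url.toList = some (p.toList, t) := by
    intro q p t hq hc hu
    rw [hu, hq, List.append_assoc, ← List.append_assoc, hc]
  cases hpart : pvPartition? "://".toList url.toList with
  | none =>
    -- no '://' in url: every startswith is false, both sides return url unchanged
    have nos : ∀ (q p : String),
        q.toList = p.toList ++ "://".toList →
        (∀ u, pvPartition? "://".toList (p.toList ++ "://".toList ++ u)
            = some (p.toList, u)) →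
        ¬ (PySem.Str.startswith url q = true) := by
      intro q p hq hc hs
      obtain ⟨t, ht⟩ := (sw q).mp hs
      have hk := key q p t hq hc ht
      rw [hpart] at hk
      simp at hk
    have h1 := nos "postgresql+psycopg2://" "postgresql+psycopg2" (by decide) part_s1
    have h2 := nos "postgresql+psycopg://" "postgresql+psycopg" (by decide) part_s2
    have h3 := nos "postgresql+asyncpg://" "postgresql+asyncpg" (by decide) part_s3
    simp only [normalize_postgres_dsn_py, normalize_postgres_dsn_py_alt, pvLoopA, hpart]
    rw [if_neg h1, if_neg h2, if_neg h3]
  | some ab =>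
    obtain ⟨a, b⟩ := ab
    have hurl : url.toList = a ++ "://".toList ++ b := pvPartition?_eq_some hpart
    -- startswith "scheme://" ↔ the partitioned scheme is exactly that scheme
    have swa : ∀ (q p : String),
        q.toList = p.toList ++ "://".toList →
        (∀ u, pvPartition? "://".toList (p.toList ++ "://".toList ++ u)
            = some (p.toList, u)) →
        (PySem.Str.startswith url q = true ↔ a = p.toList) := by
      intro q p hq hc
      constructor
      · intro hs
        obtain ⟨t, ht⟩ := (sw q).mp hs
        have h2 := key q p t hq hc ht
        rw [hpart] at h2
        simp only [Option.some.injEq, Prod.mk.injEq] at h2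
        exact h2.1
      · intro ha
        exact (sw q).mpr ⟨b, by rw [hurl, ha, hq, List.append_assoc]⟩
    have sw1 := swa "postgresql+psycopg2://" "postgresql+psycopg2" (by decide) part_s1
    have sw2 := swa "postgresql+psycopg://" "postgresql+psycopg" (by decide) part_s2
    have sw3 := swa "postgresql+asyncpg://" "postgresql+asyncpg" (by decide) part_s3
    have hrw : ∀ (q p : String), q.toList = p.toList ++ "://".toList →
        a = p.toList → url.toList = q.toList ++ b := by
      intro q p hq ha
      rw [hurl, ha, hq, List.append_assoc]
    simp only [normalize_postgres_dsn_py, normalize_postgres_dsn_py_alt, pvLoopA, hpart]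
    by_cases c1 : a = "postgresql+psycopg2".toList
    · rw [if_pos (sw1.mpr c1),
        hrw "postgresql+psycopg2://" "postgresql+psycopg2" (by decide) c1,
        pvReplace1_prefix,
        if_pos (show _ = true by rw [c1]; decide)]
    · rw [if_neg (by rw [sw1]; exact c1)]
      by_cases c2 : a = "postgresql+psycopg".toList
      · rw [if_pos (sw2.mpr c2),
          hrw "postgresql+psycopg://" "postgresql+psycopg" (by decide) c2,
          pvReplace1_prefix,
          if_pos (show _ = true by rw [c2]; decide)]
      · rw [if_neg (by rw [sw2]; exact c2)]
        by_cases c3 : a = "postgresql+asyncpg".toList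
        · rw [if_pos (sw3.mpr c3),
            hrw "postgresql+asyncpg://" "postgresql+asyncpg" (by decide) c3,
            pvReplace1_prefix,
            if_pos (show _ = true by rw [c3]; decide)]
        · rw [if_neg (by rw [sw3]; exact c3)]
          have hcon : ["postgresql+psycopg2".toList, "postgresql+psycopg".toList,
              "postgresql+asyncpg".toList].contains a = false := by
            simp only [List.contains_cons, List.contains_nil, Bool.or_eq_false_iff]
            exact ⟨beq_eq_false_iff_ne.mpr c1, beq_eq_false_iff_ne.mpr c2,
              beq_eq_false_iff_ne.mpr c3, trivial⟩
          rw [if_neg (fun h => Bool.false_ne_true (hcon ▸ h))]
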